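-- pv_equiv track=rewrite | github.com/AntonLydike/tack | tack/cli.py | docstr_to_pars
-- ===== SOURCE A (Python) =====
-- def docstr_to_pars(docstr: str) -> tuple[str, ...]:
--     """
--     Clean a docstring and convert it to a list of paragraphs.
--     """
--     pars = []
--     par = []
--     for line in docstr.split('\n'):
--         line = line.strip()
--         if not line and par:
--             pars.append(" ".join(par))
--             par = []
--             continue
--         if not line:
--             continue
--         par.append(line)
--     if par:
--         pars.append(" ".join(par))
--     return tuple(pars)
-- ===== SOURCE B (Python) =====
-- def docstr_to_pars(docstr: str) -> tuple[str, ...]: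
--     """
--     Clean a docstring and convert it to a list of paragraphs.
--     """
--     stripped = [line.strip() for line in docstr.split('\n')]
--     pars = []
--     i, n = 0, len(stripped)
--     while i < n:
--         if stripped[i]:
--             j = i
--             while j < n and stripped[j]:
--                 j += 1
--             pars.append(' '.join(stripped[i:j]))
--             i = j
--         else:
--             i += 1
--     return tuple(pars)
-- ===== Notes on version B (the rewrite author's own statement) =====
-- stated objective: alternative
-- what changed: Replaces A's stateful single pass with par/pars accumulators and a post-loop flush by a strip-all-lines-first pass followed by a two-pointer run scan that joins each maximal run of non-blank lines directly.
import Mathlib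
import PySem

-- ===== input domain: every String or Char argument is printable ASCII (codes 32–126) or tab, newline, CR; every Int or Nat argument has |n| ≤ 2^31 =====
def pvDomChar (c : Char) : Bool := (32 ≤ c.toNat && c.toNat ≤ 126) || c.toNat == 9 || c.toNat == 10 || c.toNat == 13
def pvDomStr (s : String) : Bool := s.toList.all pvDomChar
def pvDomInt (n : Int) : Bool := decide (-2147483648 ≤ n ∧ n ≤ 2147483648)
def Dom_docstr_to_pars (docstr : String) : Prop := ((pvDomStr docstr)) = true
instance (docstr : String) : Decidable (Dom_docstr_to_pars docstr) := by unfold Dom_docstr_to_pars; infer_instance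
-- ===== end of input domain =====

-- B replaces A's stateful accumulator pass by stripping all lines first and then run-scanning
-- maximal non-blank runs (alternative decomposition, same cost).


-- ===== PORT A =====
-- A's loop body, state (pars, par); branches in A's order.
def pvStepA (st : List String × List String) (line : String) : List String × List String :=
  let line := PySem.Str.strip line
  if line = "" ∧ st.2 ≠ [] then (st.1 ++ [PySem.Str.join " " st.2], [])
  else if line = "" then st
  else (st.1, st.2 ++ [line])

def docstr_to_pars (docstr : String) : List String :=
  let st := ((PySem.Str.split? docstr "\n").getD []).foldl pvStepA ([], [])
  if st.2 ≠ [] then st.1 ++ [PySem.Str.join " " st.2] else st.1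

-- ===== PORT B =====
-- B's run scan: the inner 'while j' scan is the takeWhile, 'i = j' is the dropWhile.
def docstr_to_pars_altGo : List String → List String
  | [] => []
  | l :: ls =>
    if _h : l = "" then docstr_to_pars_altGo ls
    else
      PySem.Str.join " " ((l :: ls).takeWhile (fun x => x ≠ ""))
        :: docstr_to_pars_altGo ((l :: ls).dropWhile (fun x => x ≠ ""))
termination_by ls => ls.length
decreasing_by
  · simp
  · have hd : decide (l ≠ "") = true := by simp [_h]
    simp only [List.dropWhile, hd]
    exact Nat.lt_succ_of_le (List.length_dropWhile_le _ _)

def docstr_to_pars_alt (docstr : String) : List String :=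
  docstr_to_pars_altGo (((PySem.Str.split? docstr "\n").getD []).map PySem.Str.strip)

-- ===== PRECONDITION & SPEC =====
def Spec_docstr_to_pars (docstr : String) (out : List String) : Prop := out = docstr_to_pars_alt docstr
instance (docstr : String) (out : List String) : Decidable (Spec_docstr_to_pars docstr out) := by unfold Spec_docstr_to_pars; infer_instance

-- ===== CLAIM (what is proved, stated in full; the proofs are below) =====
def Claim_equal_docstr_to_pars : Prop := ∀ (docstr : String), Dom_docstr_to_pars docstr → Spec_docstr_to_pars docstr (docstr_to_pars docstr)

-- ===== LEMMAS AND PROOFS =====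

-- A's core after strip has been mapped onto the lines.
def pvCore : List String → List String → List String
  | [], par => if par ≠ [] then [PySem.Str.join " " par] else []
  | l :: ls, par =>
    if l = "" then (if par ≠ [] then PySem.Str.join " " par :: pvCore ls [] else pvCore ls par)
    else pvCore ls (par ++ [l])

lemma pvFoldA_eq_core (ls : List String) : ∀ (pars par : List String),
    (let st := ls.foldl pvStepA (pars, par);
     if st.2 ≠ [] then st.1 ++ [PySem.Str.join " " st.2] else st.1)
    = pars ++ pvCore (ls.map PySem.Str.strip) par := by
  induction ls with
  | nil =>
    intro pars par
    simp only [List.foldl_nil, List.map_nil, pvCore]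
    split_ifs <;> simp_all
  | cons l ls ih =>
    intro pars par
    simp only [List.foldl_cons, List.map_cons, pvCore]
    by_cases hs : PySem.Str.strip l = ""
    · by_cases hp : par = []
      · simp [pvStepA, hs, hp, ih]
      · simp only [pvStepA, hs]
        simp [hp, ih, List.append_assoc]
    · simp only [pvStepA]
      simp [hs, ih]

lemma pvCore_eq_altGo (ls : List String) : ∀ (par : List String),
    pvCore ls par =
      if par = [] then docstr_to_pars_altGo ls
      else PySem.Str.join " " (par ++ ls.takeWhile (fun x => x ≠ ""))
             :: docstr_to_pars_altGo (ls.dropWhile (fun x => x ≠ "")) := by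
  induction ls with
  | nil =>
    intro par
    by_cases hp : par = [] <;> simp [pvCore, docstr_to_pars_altGo, hp]
  | cons l ls ih =>
    intro par
    by_cases hl : l = ""
    · subst hl
      by_cases hp : par = []
      · simp [pvCore, hp, docstr_to_pars_altGo, ih]
      · simp [pvCore, hp, docstr_to_pars_altGo, ih, List.takeWhile, List.dropWhile]
    · by_cases hp : par = []
      · subst hp
        simp only [pvCore, hl]
        rw [ih, if_pos rfl, ih, if_neg (by simp)]
        simp [docstr_to_pars_altGo, hl, List.takeWhile, List.dropWhile]
      · simp only [pvCore, hl]
        have h2 : ¬(par ++ [l] = []) := by simp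
        rw [ih (par ++ [l]), if_neg h2, if_neg hp]
        simp [hl, List.takeWhile, List.dropWhile]

-- ===== VERDICT (by name: the statement is the Claim_ definition above) =====
theorem docstr_to_pars_spec : Claim_equal_docstr_to_pars := by
  intro docstr _
  unfold Spec_docstr_to_pars docstr_to_pars docstr_to_pars_alt
  rw [pvFoldA_eq_core, pvCore_eq_altGo]
  simp
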